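-- pv_equiv track=rewrite | github.com/rlaghdtlr/PRE | PRE_laptop/Q82.py | search
-- ===== SOURCE A (Python) =====
-- def search(arr, n, t):
--     arr.sort()
--     result = 0
--     for i in range(n-2):
--         for j in range(i+1, n-1):
--             for k in range(j+1, n):
--                 total = arr[i] + arr[j] + arr[k]
--                 if total == t:
--                     return total
--                 if result < total <= t:
--                     result = total
--     return result
-- ===== SOURCE B (Python) =====
-- def search(arr, n, t):
--     # Sorts arr in place like the original; for each pair (i, j) a binary
--     # search over arr[j+1:n] replaces the innermost linear scan.
--     arr.sort()
--     best = 0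
--     for i in range(n - 2):
--         for j in range(i + 1, n - 1):
--             x = t - arr[i] - arr[j]
--             # rightmost element <= x in arr[j+1:n] (binary search)
--             lo, hi = j + 1, n
--             found = None
--             while lo < hi:
--                 mid = (lo + hi) // 2
--                 if arr[mid] <= x:
--                     found = arr[mid]
--                     lo = mid + 1
--                 else:
--                     hi = mid
--             if found is not None:
--                 s = arr[i] + arr[j] + found
--                 if s == t:
--                     return t
--                 if s > best:
--                     best = s
--     return best
-- ===== Notes on version B (the rewrite author's own statement) =====
-- stated objective: alternative
-- what changed: The innermost linear scan over k is replaced by a bounded binary search on the sorted prefix for the largest element ≤ t − arr[i] − arr[j], removing one nested loop (intended as faster, O(n^2 log n) vs O(n^3); a timing run measured 20.8x at n=4096 but could not confirm it on every large input, so no speed is claimed).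
-- outside the precondition, e.g. on search([1, 2, 3], 5, 6): A returns 6, B raises IndexError
import Mathlib
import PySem

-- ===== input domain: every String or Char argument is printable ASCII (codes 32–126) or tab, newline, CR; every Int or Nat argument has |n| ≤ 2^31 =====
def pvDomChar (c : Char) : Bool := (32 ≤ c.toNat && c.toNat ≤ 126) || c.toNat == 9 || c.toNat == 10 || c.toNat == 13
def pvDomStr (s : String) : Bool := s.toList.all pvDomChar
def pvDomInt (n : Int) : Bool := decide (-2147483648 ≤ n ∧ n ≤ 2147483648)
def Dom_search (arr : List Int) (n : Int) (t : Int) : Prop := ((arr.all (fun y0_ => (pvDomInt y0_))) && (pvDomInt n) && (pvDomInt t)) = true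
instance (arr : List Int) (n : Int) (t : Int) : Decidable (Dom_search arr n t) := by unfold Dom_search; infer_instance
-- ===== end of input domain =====

-- B replaces A's innermost linear scan by a bounded binary search on the sorted prefix; both Pythons
-- sort arr in place — the equivalence proved here is about the return value.

-- ===== PORT A =====
-- Python's early 'return total' is modelled with Except: '.error' carries the returned value
def searchStepK (a : List Int) (t : Int) (i j : Int) (s : Except Int Int) (k : Int) : Except Int Int :=
  s.bind fun result =>
    let total := PySem.List.pyGetD a i 0 + PySem.List.pyGetD a j 0 + PySem.List.pyGetD a k 0
    if total = t then Except.error total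
    else if result < total ∧ total ≤ t then Except.ok total
    else Except.ok result

def search (arr : List Int) (n : Int) (t : Int) : Int :=
  let a := PySem.List.sorted arr (fun x => x) false
  match (PySem.List.pyRange 0 (n - 2) 1).foldl
      (fun s i => (PySem.List.pyRange (i + 1) (n - 1) 1).foldl
        (fun s j => (PySem.List.pyRange (j + 1) n 1).foldl (searchStepK a t i j) s) s)
      (Except.ok 0) with
  | Except.error v => v
  | Except.ok result => result

-- ===== PORT B =====
-- hand-ported bounded binary search (PySem's bisectRight takes no lo/hi bounds): 'found' is the
-- rightmost element ≤ x seen so far; step-for-step image of Source B's while loop, exact on in-range indices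
def bsearchLe (a : List Int) (x : Int) (lo hi : Int) (found : Option Int) : Option Int :=
  if lo < hi then
    let mid := PySem.Int.floordiv (lo + hi) 2
    if PySem.List.pyGetD a mid 0 ≤ x then
      bsearchLe a x (mid + 1) hi (some (PySem.List.pyGetD a mid 0))
    else
      bsearchLe a x lo mid found
  else found
termination_by (hi - lo).toNat
decreasing_by
  · have h1 := PySem.Int.floordiv_mul_add_mod (lo + hi) 2
    have h2 := PySem.Int.mod_nonneg (lo + hi) (b := 2) (by norm_num)
    have h3 := PySem.Int.mod_lt (lo + hi) (b := 2) (by norm_num)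
    omega
  · have h1 := PySem.Int.floordiv_mul_add_mod (lo + hi) 2
    have h2 := PySem.Int.mod_nonneg (lo + hi) (b := 2) (by norm_num)
    have h3 := PySem.Int.mod_lt (lo + hi) (b := 2) (by norm_num)
    omega

def searchAltPair (a : List Int) (t n : Int) (i : Int) (s : Except Int Int) (j : Int) : Except Int Int :=
  s.bind fun best =>
    let x := t - PySem.List.pyGetD a i 0 - PySem.List.pyGetD a j 0
    match bsearchLe a x (j + 1) n none with
    | none => Except.ok best
    | some found =>
      let sum := PySem.List.pyGetD a i 0 + PySem.List.pyGetD a j 0 + found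
      if sum = t then Except.error t
      else if sum > best then Except.ok sum
      else Except.ok best

def search_alt (arr : List Int) (n : Int) (t : Int) : Int :=
  let a := PySem.List.sorted arr (fun x => x) false
  match (PySem.List.pyRange 0 (n - 2) 1).foldl
      (fun s i => (PySem.List.pyRange (i + 1) (n - 1) 1).foldl (searchAltPair a t n i) s)
      (Except.ok 0) with
  | Except.error v => v
  | Except.ok best => best

-- ===== PRECONDITION & SPEC =====
-- Pre_ excludes n > len(arr) with n ≥ 3, where A's index accesses go out of range: A then normally
-- raises IndexError, except that on a few such inputs the early exact-match return fires on the
-- in-range prefix before the out-of-range access (B raises IndexError inside its binary search there).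
def Pre_search (arr : List Int) (n : Int) (t : Int) : Prop := n ≤ (arr.length : Int) ∨ n < 3
instance (arr : List Int) (n : Int) (t : Int) : Decidable (Pre_search arr n t) := by unfold Pre_search; infer_instance
def pvWitness_search : List Int × Int × Int := ([1, 2, 3], 3, 10)
def Spec_search (arr : List Int) (n : Int) (t : Int) (out : Int) : Prop := out = search_alt arr n t
instance (arr : List Int) (n : Int) (t : Int) (out : Int) : Decidable (Spec_search arr n t out) := by unfold Spec_search; infer_instance

-- ===== CLAIM (what is proved, stated in full; the proofs are below) =====
def Claim_equal_search : Prop := ∀ (arr : List Int) (n : Int) (t : Int), Dom_search arr n t → Pre_search arr n t → Spec_search arr n t (search arr n t)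

-- ===== LEMMAS AND PROOFS =====

-- max of the elements ≤ x of a list (none if there is none): the common characterization both ports reduce to
def mLe (x : Int) : List Int → Option Int
  | [] => none
  | v :: vs =>
    match mLe x vs with
    | none => if v ≤ x then some v else none
    | some m => if v ≤ x then some (max v m) else some m

theorem mLe_le {x : Int} {l : List Int} {m : Int} (h : mLe x l = some m) : m ≤ x := by
  induction l generalizing m with
  | nil => simp [mLe] at h
  | cons v vs ih =>
    simp only [mLe] at h
    rcases hm : mLe x vs with _ | m'
    · rw [hm] at h; split_ifs at h with hv <;> simp_all
    · rw [hm] at h; have := ih hm; split_ifs at h with hv <;> simp_all <;> omega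

theorem mLe_mem {x : Int} {l : List Int} {m : Int} (h : mLe x l = some m) : m ∈ l := by
  induction l generalizing m with
  | nil => simp [mLe] at h
  | cons v vs ih =>
    simp only [mLe] at h
    rcases hm : mLe x vs with _ | m'
    · rw [hm] at h; split_ifs at h with hv <;> simp_all
    · rw [hm] at h; have := ih hm
      split_ifs at h with hv
      · rcases max_choice v m' with hc | hc <;> simp_all
      · simp_all

theorem mLe_eq_none_iff {x : Int} {l : List Int} : mLe x l = none ↔ ∀ v ∈ l, x < v := by
  induction l with
  | nil => simp [mLe]
  | cons v vs ih =>
    simp only [mLe]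
    rcases hm : mLe x vs with _ | m'
    · have := ih.mp hm
      split_ifs with hv <;> simp_all <;> omega
    · have hmem := mLe_mem hm
      have hle := mLe_le hm
      split_ifs with hv <;>
        (simp only [false_iff]; intro hall;
         exact absurd (hall m' (List.mem_cons_of_mem _ hmem)) (by omega))

theorem mLe_ub {x : Int} {l : List Int} {m : Int} (h : mLe x l = some m) :
    ∀ v ∈ l, v ≤ x → v ≤ m := by
  induction l generalizing m with
  | nil => simp
  | cons v vs ih =>
    intro w hw hwx
    simp only [mLe] at h
    rcases hm : mLe x vs with _ | m' <;> rw [hm] at h <;>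
      split_ifs at h with hv <;> simp only [Option.some.injEq] at h
    · rcases List.mem_cons.mp hw with hweq | hwmem
      · omega
      · exact absurd hwx (by have := mLe_eq_none_iff.mp hm _ hwmem; omega)
    · rcases List.mem_cons.mp hw with hweq | hwmem
      · omega
      · have := ih hm _ hwmem hwx; omega
    · rcases List.mem_cons.mp hw with hweq | hwmem
      · omega
      · have := ih hm _ hwmem hwx; omega

theorem mLe_eq_some_of {x : Int} {l : List Int} {c : Int} (hmem : c ∈ l) (hcx : c ≤ x)
    (hub : ∀ v ∈ l, v ≤ x → v ≤ c) : mLe x l = some c := by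
  rcases hm : mLe x l with _ | m
  · exact absurd (mLe_eq_none_iff.mp hm _ hmem) (by omega)
  · have h1 := mLe_ub hm _ hmem hcx
    have h2 := hub _ (mLe_mem hm) (mLe_le hm)
    simp only [Option.some.injEq]; omega

theorem mLe_append (x : Int) (l1 l2 : List Int) :
    mLe x (l1 ++ l2) =
      match mLe x l1, mLe x l2 with
      | none, r => r
      | some m, none => some m
      | some m, some m' => some (max m m') := by
  induction l1 with
  | nil => simp [mLe]
  | cons v vs ih =>
    simp only [List.cons_append, mLe, ih]
    rcases mLe x vs with _ | m <;> rcases mLe x l2 with _ | m' <;>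
      split_ifs <;> simp [max_assoc]

-- the values a[lo], …, a[hi-1]
def vals (a : List Int) (lo hi : Int) : List Int :=
  (PySem.List.pyRange lo hi 1).map (fun k => PySem.List.pyGetD a k 0)

theorem sorted_getD_le {a : List Int} (hs : a.Pairwise (· ≤ ·)) {k1 k2 : Int}
    (h0 : 0 ≤ k1) (h12 : k1 ≤ k2) (h2 : k2 < (a.length : Int)) :
    PySem.List.pyGetD a k1 0 ≤ PySem.List.pyGetD a k2 0 := by
  rw [PySem.List.pyGetD_eq_getElem a 0 h0 (by omega), PySem.List.pyGetD_eq_getElem a 0 (by omega) h2]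
  rcases eq_or_lt_of_le h12 with h | h
  · subst h; exact le_refl _
  · exact List.pairwise_iff_getElem.mp hs _ _ (by omega) (by omega) (by omega)

theorem mem_vals {a : List Int} {lo hi v : Int} :
    v ∈ vals a lo hi ↔ ∃ k : Int, lo ≤ k ∧ k < hi ∧ v = PySem.List.pyGetD a k 0 := by
  simp only [vals, List.mem_map, PySem.List.mem_pyRange_one]
  constructor
  · rintro ⟨k, ⟨h1, h2⟩, rfl⟩; exact ⟨k, h1, h2, rfl⟩
  · rintro ⟨k, h1, h2, rfl⟩; exact ⟨k, ⟨h1, h2⟩, rfl⟩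

-- binary-search correctness: bsearchLe returns the max element ≤ x of a[lo:hi], else 'found'
theorem bsearchLe_eq (a : List Int) (hs : a.Pairwise (· ≤ ·)) (x : Int) (lo hi : Int)
    (found : Option Int) (hlo : 0 ≤ lo) (hhi : hi ≤ (a.length : Int)) :
    bsearchLe a x lo hi found =
      match mLe x (vals a lo hi) with
      | none => found
      | some m => some m := by
  rw [bsearchLe]
  by_cases hlh : lo < hi
  · simp only [hlh, if_true]
    have hmid1 := PySem.Int.floordiv_mul_add_mod (lo + hi) 2
    have hmid2 := PySem.Int.mod_nonneg (lo + hi) (b := 2) (by norm_num)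
    have hmid3 := PySem.Int.mod_lt (lo + hi) (b := 2) (by norm_num)
    set mid := PySem.Int.floordiv (lo + hi) 2 with hmiddef
    have hb : lo ≤ mid ∧ mid < hi := by omega
    by_cases hle : PySem.List.pyGetD a mid 0 ≤ x
    · simp only [hle, if_true]
      rw [bsearchLe_eq a hs x (mid + 1) hi _ (by omega) hhi]
      have hsplit : vals a lo hi = vals a lo (mid + 1) ++ vals a (mid + 1) hi := by
        rw [vals, PySem.List.pyRange_one_append lo (mid + 1) hi (by omega) (by omega), List.map_append]
        rfl
      have hleft : mLe x (vals a lo (mid + 1)) = some (PySem.List.pyGetD a mid 0) := by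
        apply mLe_eq_some_of
        · exact mem_vals.mpr ⟨mid, by omega, by omega, rfl⟩
        · exact hle
        · rintro v hv _
          rcases mem_vals.mp hv with ⟨k, hk1, hk2, rfl⟩
          exact sorted_getD_le hs (by omega) (by omega) (by omega)
      rw [hsplit, mLe_append, hleft]
      rcases hr : mLe x (vals a (mid + 1) hi) with _ | m
      · simp
      · have hmm : PySem.List.pyGetD a mid 0 ≤ m := by
          rcases mem_vals.mp (mLe_mem hr) with ⟨k, hk1, hk2, rfl⟩
          exact sorted_getD_le hs (by omega) (by omega) (by omega)
        simp [max_eq_right hmm]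
    · simp only [hle, if_false]
      rw [bsearchLe_eq a hs x lo mid found hlo (by omega)]
      have hsplit : vals a lo hi = vals a lo mid ++ vals a mid hi := by
        rw [vals, PySem.List.pyRange_one_append lo mid hi (by omega) (by omega), List.map_append]
        rfl
      have hright : mLe x (vals a mid hi) = none := by
        apply mLe_eq_none_iff.mpr
        rintro v hv
        rcases mem_vals.mp hv with ⟨k, hk1, hk2, rfl⟩
        have := sorted_getD_le hs (k1 := mid) (k2 := k) (by omega) (by omega) (by omega)
        omega
      rw [hsplit, mLe_append, hright]
      rcases mLe x (vals a lo mid) with _ | m <;> simp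
  · simp only [hlh, if_false]
    have : vals a lo hi = [] := by
      rw [vals, PySem.List.pyRange_one_eq_nil (by omega)]; rfl
    rw [this]; rfl
termination_by (hi - lo).toNat
decreasing_by
  · omega
  · omega

-- A's inner k-loop body with the element values made explicit (searchStepK a t i j s k reduces to it)
def stepA (ai aj t : Int) (s : Except Int Int) (v : Int) : Except Int Int :=
  s.bind fun result =>
    let total := ai + aj + v
    if total = t then Except.error total
    else if result < total ∧ total ≤ t then Except.ok total
    else Except.ok result

theorem foldl_stepA_error (ai aj t e : Int) (l : List Int) :
    l.foldl (stepA ai aj t) (Except.error e) = Except.error e := by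
  induction l with
  | nil => rfl
  | cons v vs ih => exact ih

-- A's innermost k-loop, over the list of scanned values, reduced to mLe
theorem innerA_eq (ai aj t res : Int) (vs : List Int) :
    vs.foldl (stepA ai aj t) (Except.ok res) =
      match mLe (t - ai - aj) vs with
      | none => Except.ok res
      | some m =>
        if ai + aj + m = t then Except.error t
        else if res < ai + aj + m then Except.ok (ai + aj + m)
        else Except.ok res := by
  induction vs generalizing res with
  | nil => rfl
  | cons v vs ih =>
    rw [List.foldl_cons]
    have hstep : stepA ai aj t (Except.ok res) v =
        (if ai + aj + v = t then Except.error (ai + aj + v)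
         else if res < ai + aj + v ∧ ai + aj + v ≤ t then Except.ok (ai + aj + v)
         else Except.ok res) := rfl
    rw [hstep]
    simp only [mLe]
    by_cases hvt : ai + aj + v = t
    · have hvb : v ≤ t - ai - aj := by omega
      rw [if_pos hvt, foldl_stepA_error]
      rcases hm : mLe (t - ai - aj) vs with _ | m'
      · simp [hvb, hvt]
      · have := mLe_le hm
        have hmax : max v m' = v := by omega
        simp [hvb, hmax, hvt]
    · rw [if_neg hvt]
      by_cases hvb : v ≤ t - ai - aj
      · by_cases hres : res < ai + aj + v
        · rw [if_pos ⟨hres, by omega⟩, ih]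
          rcases hm : mLe (t - ai - aj) vs with _ | m'
          · simp [hvb, hvt, hres]
          · have hm'le := mLe_le hm
            rcases max_choice v m' with hc | hc <;>
              simp only [hvb, if_true, hc] <;>
              split_ifs <;> first | rfl | omega | (simp_all; omega) | simp_all
        · rw [if_neg (by omega : ¬ (res < ai + aj + v ∧ ai + aj + v ≤ t)), ih]
          rcases hm : mLe (t - ai - aj) vs with _ | m'
          · simp [hvb, hvt, hres]
          · have hm'le := mLe_le hm
            rcases max_choice v m' with hc | hc <;>
              simp only [hvb, if_true, hc] <;>
              split_ifs <;> first | rfl | omega | (simp_all; omega) | simp_all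
      · rw [if_neg (by omega : ¬ (res < ai + aj + v ∧ ai + aj + v ≤ t)), ih]
        rcases hm : mLe (t - ai - aj) vs with _ | m' <;> simp [hvb]

theorem foldl_searchStepK_eq (a : List Int) (t i j : Int) (s : Except Int Int) (lo hi : Int) :
    (PySem.List.pyRange lo hi 1).foldl (searchStepK a t i j) s =
      (vals a lo hi).foldl (stepA (PySem.List.pyGetD a i 0) (PySem.List.pyGetD a j 0) t) s := by
  rw [vals, List.foldl_map]; rfl

-- per-(i,j) agreement of the two ports' pair steps
theorem pair_eq (a : List Int) (hs : a.Pairwise (· ≤ ·)) (t n i j : Int)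
    (hj : 0 ≤ j) (hn : n ≤ (a.length : Int)) (s : Except Int Int) :
    (PySem.List.pyRange (j + 1) n 1).foldl (searchStepK a t i j) s = searchAltPair a t n i s j := by
  rw [foldl_searchStepK_eq]
  rcases s with e | res
  · rw [foldl_stepA_error]; rfl
  · rw [innerA_eq]
    show _ = searchAltPair a t n i (Except.ok res) j
    unfold searchAltPair
    rw [show (Except.ok res).bind = fun f => f res from rfl]
    simp only
    rw [bsearchLe_eq a hs _ (j + 1) n none (by omega) hn]
    rcases mLe (t - PySem.List.pyGetD a i 0 - PySem.List.pyGetD a j 0)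
        (vals a (j + 1) n) with _ | m
    · rfl
    · rfl

theorem search_eq_alt (arr : List Int) (n t : Int) (hpre : Pre_search arr n t) :
    search arr n t = search_alt arr n t := by
  unfold search search_alt
  show (match (PySem.List.pyRange 0 (n - 2) 1).foldl
      (fun s i => (PySem.List.pyRange (i + 1) (n - 1) 1).foldl
        (fun s j => (PySem.List.pyRange (j + 1) n 1).foldl
          (searchStepK (PySem.List.sorted arr (fun x => x) false) t i j) s) s)
      (Except.ok 0) with
    | Except.error v => v
    | Except.ok result => result) =
    (match (PySem.List.pyRange 0 (n - 2) 1).foldl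
      (fun s i => (PySem.List.pyRange (i + 1) (n - 1) 1).foldl
        (searchAltPair (PySem.List.sorted arr (fun x => x) false) t n i) s)
      (Except.ok 0) with
    | Except.error v => v
    | Except.ok best => best)
  by_cases hn : n ≤ (arr.length : Int)
  · have hs := PySem.List.sorted_pairwise arr (fun x => x)
    have hlen : ((PySem.List.sorted arr (fun x => x) false).length : Int) = (arr.length : Int) := by
      rw [PySem.List.length_sorted]
    have key : (PySem.List.pyRange 0 (n - 2) 1).foldl
        (fun s i => (PySem.List.pyRange (i + 1) (n - 1) 1).foldl
          (fun s j => (PySem.List.pyRange (j + 1) n 1).foldl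
            (searchStepK (PySem.List.sorted arr (fun x => x) false) t i j) s) s)
        (Except.ok 0) =
        (PySem.List.pyRange 0 (n - 2) 1).foldl
        (fun s i => (PySem.List.pyRange (i + 1) (n - 1) 1).foldl
          (searchAltPair (PySem.List.sorted arr (fun x => x) false) t n i) s)
        (Except.ok 0) := by
      apply PySem.List.foldl_congr_mem
      intro acc i hi
      apply PySem.List.foldl_congr_mem
      intro s j hjmem
      have hi0 : 0 ≤ i := (PySem.List.mem_pyRange_one.mp hi).1
      have hj0 : 0 ≤ j := by have := (PySem.List.mem_pyRange_one.mp hjmem).1; omega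
      exact pair_eq _ hs t n i j hj0 (by omega) s
    rw [key]
  · rcases hpre with h | h
    · omega
    · rw [PySem.List.pyRange_one_eq_nil (by omega : n - 2 ≤ (0 : Int))]
      rfl

-- ===== VERDICT (by name: the statement is the Claim_ definition above) =====
theorem search_spec : Claim_equal_search := by
  intro arr n t _ hpre
  unfold Spec_search
  exact search_eq_alt arr n t hpre
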